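-- pv_equiv track=rewrite | github.com/miliar/Code_Jam_Webscraper | solutions_python/Problem_155/1259.py | solve
-- ===== SOURCE A (Python) =====
-- def solve(data):
--     max_shyness, audience = data
--     nstanding = 0
--     nfriends = 0
--
--     for shyness, a in enumerate(audience[:max_shyness + 1]):
--         missing = max([shyness - nstanding, 0])
--         nfriends += missing
--         nstanding += missing + a
--
--     return nfriends
-- ===== SOURCE B (Python) =====
-- def solve(data):
--     max_shyness, audience = data
--     front = audience[:max_shyness + 1]
--     prefix = [0]
--     for a in front:
--         prefix.append(prefix[-1] + a)
--     return max([0] + [i - prefix[i] for i in range(len(front))])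
-- ===== Notes on version B (the rewrite author's own statement) =====
-- stated objective: alternative
-- what changed: Replaces A's greedy accumulator that folds added friends back into the standing count with a prefix-sum list built first and a separate max over deficits i - prefix[i], clamped at 0.
import Mathlib
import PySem

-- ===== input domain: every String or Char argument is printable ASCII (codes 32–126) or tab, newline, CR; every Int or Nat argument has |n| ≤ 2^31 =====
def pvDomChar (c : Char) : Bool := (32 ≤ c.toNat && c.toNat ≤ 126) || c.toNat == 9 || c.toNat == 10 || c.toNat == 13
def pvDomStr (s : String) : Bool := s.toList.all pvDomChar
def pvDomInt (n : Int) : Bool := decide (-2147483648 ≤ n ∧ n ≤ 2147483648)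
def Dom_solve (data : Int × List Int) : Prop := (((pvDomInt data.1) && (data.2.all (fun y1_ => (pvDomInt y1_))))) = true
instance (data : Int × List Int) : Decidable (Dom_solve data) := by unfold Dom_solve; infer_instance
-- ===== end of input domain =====

-- B replaces A's greedy friends-folded-into-standing accumulator with a prefix-sum list and a max over deficits (alternative decomposition, same cost).

-- ===== PORT A =====
-- the for-loop over enumerate(audience[:max_shyness+1]) with state (nstanding, nfriends)
def solveLoop : List Int → Int → Int → Int → Int
  | [], _, _, nfriends => nfriends
  | a :: rest, shyness, nstanding, nfriends =>
      let missing := max (shyness - nstanding) 0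
      solveLoop rest (shyness + 1) (nstanding + missing + a) (nfriends + missing)

def solve (data : Int × List Int) : Int :=
  solveLoop (PySem.List.slice data.2 none (some (data.1 + 1))) 0 0 0

-- ===== PORT B =====
-- the loop 'for a in front: prefix.append(prefix[-1] + a)' tracking the running last element
def buildPrefix : Int → List Int → List Int
  | _, [] => []
  | last, a :: rest => (last + a) :: buildPrefix (last + a) rest

def solve_alt (data : Int × List Int) : Int :=
  let front := PySem.List.slice data.2 none (some (data.1 + 1))
  let pref := (0 : Int) :: buildPrefix 0 front
  -- max([0] + [i - prefix[i] for i in range(len(front))])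
  ((List.range front.length).map (fun (i : Nat) => (i : Int) - pref.getD i 0)).foldl max 0

-- ===== PRECONDITION & SPEC =====
def Spec_solve (data : Int × List Int) (out : Int) : Prop := out = solve_alt data
instance (data : Int × List Int) (out : Int) : Decidable (Spec_solve data out) := by unfold Spec_solve; infer_instance

-- ===== CLAIM (what is proved, stated in full; the proofs are below) =====
def Claim_equal_solve : Prop := ∀ (data : Int × List Int), Dom_solve data → Spec_solve data (solve data)

-- ===== LEMMAS AND PROOFS =====

-- common reference: running maximum of the deficits k - s (s = pure prefix sum)
def bestDef : List Int → Int → Int → Int → Int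
  | [], _, _, b => b
  | a :: rest, k, s, b => bestDef rest (k + 1) (s + a) (max b (k - s))

theorem solveLoop_eq_bestDef (l : List Int) : ∀ (k s f : Int),
    solveLoop l k (s + f) f = bestDef l k s f := by
  induction l with
  | nil => intro k s f; rfl
  | cons a rest ih =>
    intro k s f
    show solveLoop rest (k + 1) ((s + f) + max (k - (s + f)) 0 + a)
        (f + max (k - (s + f)) 0) = bestDef rest (k + 1) (s + a) (max f (k - s))
    have h1 : f + max (k - (s + f)) 0 = max f (k - s) := by omega
    have h2 : (s + f) + max (k - (s + f)) 0 + a = (s + a) + max f (k - s) := by omega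
    rw [h1, h2, ih]

theorem foldl_max_eq_bestDef (l : List Int) : ∀ (last k b : Int),
    ((List.range l.length).map
        (fun (i : Nat) => (k + (i : Int)) - ((last :: buildPrefix last l).getD i 0))).foldl max b
      = bestDef l k last b := by
  induction l with
  | nil => intro last k b; rfl
  | cons a rest ih =>
    intro last k b
    rw [List.length_cons, List.range_succ_eq_map, List.map_cons, List.map_map,
        List.foldl_cons]
    have hfun : ((fun (i : Nat) => (k + (i : Int)) - ((last :: buildPrefix last (a :: rest)).getD i 0))
          ∘ Nat.succ)
        = (fun (i : Nat) => ((k + 1) + (i : Int)) - (((last + a) :: buildPrefix (last + a) rest).getD i 0)) := by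
      funext i
      simp only [Function.comp, buildPrefix, List.getD_cons_succ]
      push_cast
      ring_nf
    have hb : max b (k + ((0 : Nat) : Int) - (last :: buildPrefix last (a :: rest)).getD 0 0)
        = max b (k - last) := by
      norm_num
    rw [hfun, hb, ih]
    rfl

theorem solve_spec' (data : Int × List Int) : solve data = solve_alt data := by
  rcases data with ⟨ms, aud⟩
  show solveLoop (PySem.List.slice aud none (some (ms + 1))) 0 0 0 = _
  set front := PySem.List.slice aud none (some (ms + 1)) with hfront
  have hA : solveLoop front 0 0 0 = bestDef front 0 0 0 := by
    have := solveLoop_eq_bestDef front 0 0 0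
    simpa using this
  have hB : solve_alt (ms, aud) = bestDef front 0 0 0 := by
    show ((List.range front.length).map
        (fun (i : Nat) => (i : Int) - (((0 : Int) :: buildPrefix 0 front).getD i 0))).foldl max 0
      = bestDef front 0 0 0
    have hfun : (fun (i : Nat) => (i : Int) - (((0 : Int) :: buildPrefix 0 front).getD i 0))
        = (fun (i : Nat) => ((0 : Int) + (i : Int)) - (((0 : Int) :: buildPrefix 0 front).getD i 0)) := by
      funext i; ring_nf
    rw [hfun, foldl_max_eq_bestDef]
  rw [hA, hB]

-- ===== VERDICT (by name: the statement is the Claim_ definition above) =====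
theorem solve_spec : Claim_equal_solve := by
  intro data _
  show solve data = solve_alt data
  exact solve_spec' data
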